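-- pv_equiv track=rewrite | github.com/fkulic/advent-of-code | 2015/day5.py | part_two
-- ===== SOURCE A (Python) =====
-- from collections import defaultdict
--
-- def part_two(data: list[str]) -> int:
--     nice = 0
--     for s in data:
--         rule1 = False
--         rule2 = False
--         not_nice = False
--         pairs = defaultdict(int)
--         pairs[s[-2:]] += 1
--         for i in range(2, len(s)):
--             if s[i - 2] == s[i] and s[i] != s[i - 1]:
--                 rule2 = True
--             if s[i - 2] == s[i] and s[i - 1] == s[i]:
--                 not_nice = True
--                 break
--             pairs[s[i - 2 : i]] += 1
--
--         for c in pairs.values():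
--             if c > 1:
--                 rule1 = True
--                 break
--         if not not_nice and rule1 and rule2:
--             nice += 1
--
--     return nice
-- ===== SOURCE B (Python) =====
-- def part_two(data: list[str]) -> int:
--     def nice(s: str) -> bool:
--         has_triple = any(s[i] == s[i + 1] == s[i + 2] for i in range(len(s) - 2))
--         has_pair = any(s[i:i + 2] in s[i + 2:] for i in range(len(s) - 1))
--         has_aba = any(s[i] == s[i + 2] for i in range(len(s) - 2))
--         return not has_triple and has_pair and has_aba
--     return sum(1 for s in data if nice(s))
-- ===== Notes on version B (the rewrite author's own statement) =====
-- stated objective: simpler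
-- what changed: Replaces A's maintained pair-count dictionary, break-on-triple loop and values scan by three independent one-line boolean scans per string (triple test, non-overlapping pair-in-suffix substring test, aba test), counting a string nice iff not-triple and pair and aba.
import Mathlib
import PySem

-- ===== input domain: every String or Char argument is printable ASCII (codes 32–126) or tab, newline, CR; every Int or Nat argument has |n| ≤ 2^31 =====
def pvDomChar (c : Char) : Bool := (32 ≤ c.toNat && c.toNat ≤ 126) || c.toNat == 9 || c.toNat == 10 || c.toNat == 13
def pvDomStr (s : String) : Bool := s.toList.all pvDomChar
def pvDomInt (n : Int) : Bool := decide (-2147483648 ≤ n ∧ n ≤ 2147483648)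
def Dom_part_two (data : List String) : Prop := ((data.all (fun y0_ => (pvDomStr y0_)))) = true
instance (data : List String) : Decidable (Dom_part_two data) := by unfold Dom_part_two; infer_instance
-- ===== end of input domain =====

-- B replaces A's pair-count dictionary and break-loop by three independent boolean scans per string; same return value, no side effects.

-- ===== PORT A =====
-- inner `for i in range(2, len(s))` with its break; state = (rule2, not_nice, pairs)
def pvALoop (cs : List Char) (is : List Int) (rule2 : Bool)
    (pairs : PySem.Dict (List Char) Int) : Bool × Bool × PySem.Dict (List Char) Int :=
  match is with
  | [] => (rule2, false, pairs)
  | i :: rest =>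
    let rule2' := if PySem.List.pyGetD cs (i - 2) ' ' = PySem.List.pyGetD cs i ' ' ∧
                     PySem.List.pyGetD cs i ' ' ≠ PySem.List.pyGetD cs (i - 1) ' ' then true else rule2
    if PySem.List.pyGetD cs (i - 2) ' ' = PySem.List.pyGetD cs i ' ' ∧
       PySem.List.pyGetD cs (i - 1) ' ' = PySem.List.pyGetD cs i ' ' then
      (rule2', true, pairs)
    else
      pvALoop cs rest rule2' (pairs.modify (PySem.List.slice cs (some (i - 2)) (some i)) 0 (· + 1))

-- `for c in pairs.values(): if c > 1: rule1 = True; break`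
def pvRule1Loop : List Int → Bool
  | [] => false
  | c :: rest => if 1 < c then true else pvRule1Loop rest

def pvNiceA (s : String) : Bool :=
  let cs := s.toList
  let pairs0 := (PySem.Dict.empty).modify (PySem.List.slice cs (some (-2)) none) 0 (· + 1)
  let r := pvALoop cs (PySem.List.pyRange 2 (cs.length : Int) 1) false pairs0
  let rule1 := pvRule1Loop r.2.2.values
  (!r.2.1) && rule1 && r.1

def part_two (data : List String) : Int :=
  data.foldl (fun nice s => if pvNiceA s then nice + 1 else nice) 0

-- ===== PORT B =====
def pvNiceB (s : String) : Bool :=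
  let cs := s.toList
  let hasTriple := (PySem.List.pyRange 0 ((cs.length : Int) - 2) 1).any fun i =>
    decide (PySem.List.pyGetD cs i ' ' = PySem.List.pyGetD cs (i + 1) ' ' ∧
            PySem.List.pyGetD cs (i + 1) ' ' = PySem.List.pyGetD cs (i + 2) ' ')
  let hasPair := (PySem.List.pyRange 0 ((cs.length : Int) - 1) 1).any fun i =>
    PySem.Chars.isIn (PySem.List.slice cs (some i) (some (i + 2))) (PySem.List.slice cs (some (i + 2)) none)
  let hasAba := (PySem.List.pyRange 0 ((cs.length : Int) - 2) 1).any fun i =>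
    decide (PySem.List.pyGetD cs i ' ' = PySem.List.pyGetD cs (i + 2) ' ')
  !hasTriple && hasPair && hasAba

def part_two_alt (data : List String) : Int :=
  (data.countP (fun s => pvNiceB s) : Int)

-- ===== PRECONDITION & SPEC =====
def Spec_part_two (data : List String) (out : Int) : Prop := out = part_two_alt data
instance (data : List String) (out : Int) : Decidable (Spec_part_two data out) := by unfold Spec_part_two; infer_instance

-- ===== CLAIM (what is proved, stated in full; the proofs are below) =====
def Claim_equal_part_two : Prop := ∀ (data : List String), Dom_part_two data → Spec_part_two data (part_two data)

-- ===== LEMMAS AND PROOFS =====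

-- proof-only helpers and abbreviations
def pvPair (cs : List Char) (k : Nat) : List Char := (cs.drop k).take 2

-- nat-indexed mirror of pvALoop, used only in the proofs
def pvNatLoop (cs : List Char) (ks : List Nat) (r2 : Bool) (d : PySem.Dict (List Char) Int) :
    Bool × Bool × PySem.Dict (List Char) Int :=
  match ks with
  | [] => (r2, false, d)
  | k :: rest =>
    if cs.getD k ' ' = cs.getD (k+2) ' ' ∧ cs.getD (k+1) ' ' = cs.getD (k+2) ' ' then
      ((if cs.getD k ' ' = cs.getD (k+2) ' ' ∧ cs.getD (k+2) ' ' ≠ cs.getD (k+1) ' ' then true else r2),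
       true, d)
    else pvNatLoop cs rest
      (if cs.getD k ' ' = cs.getD (k+2) ' ' ∧ cs.getD (k+2) ' ' ≠ cs.getD (k+1) ' ' then true else r2)
      (d.modify (pvPair cs k) 0 (· + 1))

theorem pvALoop_eq (cs : List Char) (ks : List Nat) (r2 : Bool) (d : PySem.Dict (List Char) Int) :
    pvALoop cs (List.map (fun k : Nat => 2 + (k : Int)) ks) r2 d = pvNatLoop cs ks r2 d := by
  induction ks generalizing r2 d with
  | nil => rfl
  | cons k rest ih =>
    have h2 : (2 + ((k : Nat) : Int)) = (((k + 2) : Nat) : Int) := by push_cast; ring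
    have h0 : ((((k + 2) : Nat) : Int)) - 2 = ((k : Nat) : Int) := by push_cast; ring
    have h1 : ((((k + 2) : Nat) : Int)) - 1 = (((k + 1) : Nat) : Int) := by push_cast; ring
    rw [List.map_cons]
    simp only [pvALoop, pvNatLoop, h0, h1, h2, PySem.List.pyGetD_natCast,
      PySem.List.slice_natCast]
    have h3 : List.take (k + 2 - k) (List.drop k cs) = pvPair cs k := by
      simp [pvPair]
    rw [h3]
    split_ifs <;> first | rfl | exact ih _ _

theorem pvNatLoop_no_trip (cs : List Char) (ks : List Nat)
    (h : ∀ k ∈ ks, ¬(cs.getD k ' ' = cs.getD (k+2) ' ' ∧ cs.getD (k+1) ' ' = cs.getD (k+2) ' '))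
    (r2 : Bool) (d : PySem.Dict (List Char) Int) :
    pvNatLoop cs ks r2 d =
      (r2 || ks.any (fun k =>
          decide (cs.getD k ' ' = cs.getD (k+2) ' ' ∧ cs.getD (k+2) ' ' ≠ cs.getD (k+1) ' ')),
       false,
       ks.foldl (fun d k => d.modify (pvPair cs k) 0 (· + 1)) d) := by
  induction ks generalizing r2 d with
  | nil => simp [pvNatLoop]
  | cons k rest ih =>
    have hk := h k (List.mem_cons_self ..)
    have hrest : ∀ k ∈ rest, ¬(cs.getD k ' ' = cs.getD (k+2) ' ' ∧ cs.getD (k+1) ' ' = cs.getD (k+2) ' ') :=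
      fun k hkm => h k (List.mem_cons_of_mem _ hkm)
    simp only [pvNatLoop, if_neg hk]
    rw [ih hrest]
    cases r2 <;> simp

theorem pvNatLoop_trip (cs : List Char) (ks : List Nat) (r2 : Bool) (d : PySem.Dict (List Char) Int)
    (h : ∃ k ∈ ks, cs.getD k ' ' = cs.getD (k+2) ' ' ∧ cs.getD (k+1) ' ' = cs.getD (k+2) ' ') :
    (pvNatLoop cs ks r2 d).2.1 = true := by
  induction ks generalizing r2 d with
  | nil => simp at h
  | cons k rest ih =>
    by_cases hk : cs.getD k ' ' = cs.getD (k+2) ' ' ∧ cs.getD (k+1) ' ' = cs.getD (k+2) ' '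
    · simp only [pvNatLoop, if_pos hk]
    · have : ∃ k ∈ rest, cs.getD k ' ' = cs.getD (k+2) ' ' ∧ cs.getD (k+1) ' ' = cs.getD (k+2) ' ' := by
        rcases h with ⟨j, hj, hjt⟩
        rcases List.mem_cons.mp hj with rfl | hj'
        · exact absurd hjt hk
        · exact ⟨j, hj', hjt⟩
      simp only [pvNatLoop, if_neg hk]
      exact ih _ _ this

theorem pvRule1Loop_eq (vs : List Int) : pvRule1Loop vs = vs.any (fun c => decide (1 < c)) := by
  induction vs with
  | nil => rfl
  | cons c rest ih => by_cases hc : 1 < c <;> simp [pvRule1Loop, hc, ih]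

theorem pvFold_counter (cs : List Char) (ks : List Nat) (p0 : List Char) :
    ks.foldl (fun d k => d.modify (pvPair cs k) 0 (· + 1))
      (PySem.Dict.empty.modify p0 0 (· + 1)) =
    PySem.Dict.counter (p0 :: ks.map (pvPair cs)) := by
  rw [PySem.Dict.counter_eq_foldl, List.foldl_cons, List.foldl_map]

theorem pvRule1_counter (L : List (List Char)) :
    pvRule1Loop (PySem.Dict.counter L).values = decide (¬ L.Nodup) := by
  rw [pvRule1Loop_eq]
  have hv : (PySem.Dict.counter L).values
      = (PySem.Set.ofList L).map (fun k => ((L.count k : Nat) : Int)) := by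
    simp [PySem.Dict.values, PySem.Dict.items_counter, List.map_map, Function.comp]
  rw [hv, Bool.eq_iff_iff]
  simp only [List.any_map, List.any_eq_true, decide_eq_true_eq, Function.comp]
  constructor
  · rintro ⟨k, hk, hcnt⟩
    rw [List.nodup_iff_count_le_one]
    push_neg
    exact ⟨k, by exact_mod_cast hcnt⟩
  · intro hnd
    rw [List.nodup_iff_count_le_one] at hnd
    push_neg at hnd
    obtain ⟨k, hk⟩ := hnd
    refine ⟨k, (PySem.Set.mem_ofList _ _).mpr ?_, by exact_mod_cast hk⟩
    exact List.count_pos_iff.mp (by omega)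

theorem pvPair_eq_two (cs : List Char) (i : Nat) (h : i + 2 ≤ cs.length) :
    pvPair cs i = [cs.getD i ' ', cs.getD (i+1) ' '] := by
  have h1 : i < cs.length := by omega
  have h2 : i + 1 < cs.length := by omega
  have hd : cs.drop i = cs[i] :: cs[i+1] :: cs.drop (i+2) := by
    rw [List.drop_eq_getElem_cons h1, List.drop_eq_getElem_cons h2]
  rw [pvPair, hd, List.getD_eq_getElem _ _ h1, List.getD_eq_getElem _ _ h2]
  rfl

theorem pvPair_len (cs : List Char) (i : Nat) (h : i + 2 ≤ cs.length) :
    (pvPair cs i).length = 2 := by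
  simp [pvPair]; omega

-- core combinatorial lemma: under "no triple", the pair multiset has a duplicate iff
-- some pair reappears in the non-overlapping suffix
theorem pvPair_core (cs : List Char)
    (h' : ∀ k ∈ List.range (cs.length - 2),
      ¬(cs.getD k ' ' = cs.getD (k+2) ' ' ∧ cs.getD (k+1) ' ' = cs.getD (k+2) ' ')) :
    (¬ (pvPair cs (cs.length - 2) :: (List.range (cs.length - 2)).map (pvPair cs)).Nodup) ↔
    ∃ i, i < cs.length - 1 ∧ pvPair cs i <:+: cs.drop (i + 2) := by
  set n := cs.length with hn
  by_cases hsmall : n ≤ 1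
  · constructor
    · intro hnd
      exfalso
      apply hnd
      have : n - 2 = 0 := by omega
      simp [this]
    · rintro ⟨i, hi, _⟩; omega
  · -- n ≥ 2
    have h2n : 2 ≤ n := by omega
    have hperm : (pvPair cs (n - 2) :: (List.range (n - 2)).map (pvPair cs)).Perm
        ((List.range (n - 1)).map (pvPair cs)) := by
      have hss : n - 1 = (n - 2) + 1 := by omega
      rw [hss, List.range_succ, List.map_append, List.map_cons, List.map_nil]
      exact (List.perm_append_singleton _ _).symm
    rw [hperm.nodup_iff, List.nodup_map_iff_inj_on (List.nodup_range)]
    push_neg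
    constructor
    · rintro ⟨x, hx, y, hy, hxy, hne⟩
      rw [List.mem_range] at hx hy
      -- wlog x < y
      obtain ⟨i, j, hij, hjn, hpe⟩ : ∃ i j, i < j ∧ j < n - 1 ∧ pvPair cs i = pvPair cs j := by
        rcases Nat.lt_or_ge x y with hlt | hge
        · exact ⟨x, y, hlt, hy, hxy⟩
        · exact ⟨y, x, by omega, hx, hxy.symm⟩
      have hin : i < n - 1 := by omega
      -- j ≠ i + 1, else triple at i
      have hji : i + 2 ≤ j := by
        by_contra hcon
        have hji1 : j = i + 1 := by omega
        subst hji1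
        have hi2 : i + 2 ≤ n := by omega
        have hi3 : i + 3 ≤ n := by omega
        rw [pvPair_eq_two cs i hi2, pvPair_eq_two cs (i+1) hi3] at hpe
        have e1 : cs.getD i ' ' = cs.getD (i+1) ' ' := by
          simpa using congrArg (fun l => l.getD 0 ' ') hpe
        have e2 : cs.getD (i+1) ' ' = cs.getD (i+2) ' ' := by
          simpa using congrArg (fun l => l.getD 1 ' ') hpe
        exact h' i (List.mem_range.mpr (by omega)) ⟨e1.trans e2, e2⟩
      refine ⟨i, hin, ?_⟩
      rw [hpe]
      rw [List.infix_iff_prefix_suffix]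
      exact ⟨cs.drop j, by simpa [pvPair] using List.take_prefix 2 (cs.drop j),
        List.drop_suffix_drop_left cs hji⟩
    · rintro ⟨i, hi, hinf⟩
      have hi2 : i + 2 ≤ n := by omega
      have hlen : (pvPair cs i).length = 2 := pvPair_len cs i hi2
      rw [List.infix_iff_prefix_suffix] at hinf
      obtain ⟨t, hpre, hsuf⟩ := hinf
      rw [List.suffix_iff_eq_drop] at hsuf
      set u := (cs.drop (i+2)).length - t.length with hu
      rw [hsuf, List.drop_drop] at hpre
      set j := i + 2 + u with hj
      have hjlen : 2 ≤ (cs.drop j).length := by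
        have := hpre.length_le
        omega
      have hjn : j + 2 ≤ n := by
        rw [List.length_drop] at hjlen; omega
      have hpe : pvPair cs i = pvPair cs j := by
        rw [List.prefix_iff_eq_take] at hpre
        rw [hlen] at hpre
        exact hpre
      exact ⟨i, List.mem_range.mpr hi, j, List.mem_range.mpr (by omega), hpe, by omega⟩

theorem pvRangeA (n : Nat) :
    PySem.List.pyRange 2 (n : Int) 1 = List.map (fun k : Nat => 2 + (k : Int)) (List.range (n - 2)) := by
  rw [PySem.List.pyRange_one]
  congr 1
  congr 1
  omega

theorem pvRangeAny2 (n : Nat) (f : Int → Bool) :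
    (PySem.List.pyRange 0 ((n : Int) - 2) 1).any f
      = (List.range (n - 2)).any (fun k => f (k : Int)) := by
  rw [PySem.List.pyRange_one]
  have h : (((n : Int) - 2) - 0).toNat = n - 2 := by omega
  rw [h, List.any_map]
  congr 1
  funext k
  simp

theorem pvRangeAny1 (n : Nat) (f : Int → Bool) :
    (PySem.List.pyRange 0 ((n : Int) - 1) 1).any f
      = (List.range (n - 1)).any (fun k => f (k : Int)) := by
  rw [PySem.List.pyRange_one]
  have h : (((n : Int) - 1) - 0).toNat = n - 1 := by omega
  rw [h, List.any_map]
  congr 1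
  funext k
  simp

theorem pvCast1 (k : Nat) : ((k : Int) + 1) = (((k + 1) : Nat) : Int) := by push_cast; ring
theorem pvCast2 (k : Nat) : ((k : Int) + 2) = (((k + 2) : Nat) : Int) := by push_cast; ring

theorem pvB_triple_eq (cs : List Char) :
    ((PySem.List.pyRange 0 ((cs.length : Int) - 2) 1).any fun i =>
        decide (PySem.List.pyGetD cs i ' ' = PySem.List.pyGetD cs (i + 1) ' ' ∧
                PySem.List.pyGetD cs (i + 1) ' ' = PySem.List.pyGetD cs (i + 2) ' '))
    = (List.range (cs.length - 2)).any fun k =>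
        decide (cs.getD k ' ' = cs.getD (k+1) ' ' ∧ cs.getD (k+1) ' ' = cs.getD (k+2) ' ') := by
  rw [pvRangeAny2]
  congr 1
  funext k
  rw [pvCast1, pvCast2, PySem.List.pyGetD_natCast, PySem.List.pyGetD_natCast,
    PySem.List.pyGetD_natCast]

theorem pvB_aba_eq (cs : List Char) :
    ((PySem.List.pyRange 0 ((cs.length : Int) - 2) 1).any fun i =>
        decide (PySem.List.pyGetD cs i ' ' = PySem.List.pyGetD cs (i + 2) ' '))
    = (List.range (cs.length - 2)).any fun k =>
        decide (cs.getD k ' ' = cs.getD (k+2) ' ') := by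
  rw [pvRangeAny2]
  congr 1
  funext k
  rw [pvCast2, PySem.List.pyGetD_natCast, PySem.List.pyGetD_natCast]

theorem pvB_pair_eq (cs : List Char) :
    ((PySem.List.pyRange 0 ((cs.length : Int) - 1) 1).any fun i =>
        PySem.Chars.isIn (PySem.List.slice cs (some i) (some (i + 2)))
          (PySem.List.slice cs (some (i + 2)) none))
    = (List.range (cs.length - 1)).any fun k =>
        PySem.Chars.isIn (pvPair cs k) (cs.drop (k + 2)) := by
  rw [pvRangeAny1]
  congr 1
  funext k
  rw [pvCast2, PySem.List.slice_natCast, PySem.List.slice_from_natCast]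
  congr 1
  rw [pvPair]
  congr 1
  omega

theorem pvNice_eq (s : String) : pvNiceA s = pvNiceB s := by
  simp only [pvNiceA, pvNiceB]
  rw [PySem.List.slice_from_neg_ofNat s.toList 2 (by norm_num)]
  rw [pvRangeA, pvALoop_eq, pvB_triple_eq, pvB_aba_eq, pvB_pair_eq]
  set cs := s.toList with hcs
  set n := cs.length with hn
  have hp0 : cs.drop (n - 2) = pvPair cs (n - 2) := by
    rw [pvPair, List.take_of_length_le]
    rw [List.length_drop]
    omega
  rw [hp0]
  by_cases hT : ∃ k ∈ List.range (n - 2),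
      cs.getD k ' ' = cs.getD (k+2) ' ' ∧ cs.getD (k+1) ' ' = cs.getD (k+2) ' '
  · -- a triple exists: A breaks with not_nice = true, B has hasTriple = true
    have hA := pvNatLoop_trip cs (List.range (n - 2)) false
      (PySem.Dict.empty.modify (pvPair cs (n - 2)) 0 (· + 1)) hT
    rw [hA]
    have hB : ((List.range (n - 2)).any fun k =>
        decide (cs.getD k ' ' = cs.getD (k+1) ' ' ∧ cs.getD (k+1) ' ' = cs.getD (k+2) ' ')) = true := by
      rw [List.any_eq_true]
      obtain ⟨k, hk, e1, e2⟩ := hT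
      refine ⟨k, hk, ?_⟩
      rw [decide_eq_true_eq]
      exact ⟨e1.trans e2.symm, e2⟩
    rw [hB]
    simp
  · -- no triple: the loop runs to completion
    have h' : ∀ k ∈ List.range (n - 2),
        ¬(cs.getD k ' ' = cs.getD (k+2) ' ' ∧ cs.getD (k+1) ' ' = cs.getD (k+2) ' ') := by
      intro k hk hcon
      exact hT ⟨k, hk, hcon⟩
    rw [pvNatLoop_no_trip cs _ h']
    simp only []
    rw [pvFold_counter, pvRule1_counter]
    have hB : ((List.range (n - 2)).any fun k =>
        decide (cs.getD k ' ' = cs.getD (k+1) ' ' ∧ cs.getD (k+1) ' ' = cs.getD (k+2) ' ')) = false := by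
      rw [List.any_eq_false]
      intro k hk
      simp only [decide_eq_true_eq]
      rintro ⟨e1, e2⟩
      exact h' k hk ⟨e1.trans e2, e2⟩
    rw [hB]
    rw [Bool.eq_iff_iff]
    simp only [Bool.and_eq_true, Bool.not_false, Bool.false_or, Bool.not_true, Bool.true_and,
      List.any_eq_true, decide_eq_true_eq, List.mem_range, PySem.Chars.isIn_iff_infix]
    have hcore := pvPair_core cs h'
    constructor
    · rintro ⟨hnd, k, hk, e, _⟩
      refine ⟨?_, k, hk, e⟩
      obtain ⟨i, hi, hinf⟩ := hcore.mp hnd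
      exact ⟨i, hi, hinf⟩
    · rintro ⟨⟨i, hi, hinf⟩, k, hk, e⟩
      refine ⟨hcore.mpr ⟨i, hi, hinf⟩, k, hk, e, ?_⟩
      intro heq
      exact h' k (List.mem_range.mpr hk) ⟨e, heq.symm⟩

-- ===== VERDICT (by name: the statement is the Claim_ definition above) =====
theorem part_two_spec : Claim_equal_part_two := by
  intro data _
  unfold Spec_part_two part_two part_two_alt
  simp only [pvNice_eq]
  rw [PySem.List.foldl_if_add_one (fun s => pvNiceB s) data 0]
  simp
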